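-- pv_equiv track=rewrite | github.com/lisosoma/BI_ALGO | LineReflection356.py | LineReflection356
-- ===== SOURCE A (Python) =====
-- def LineReflection356(points):
--     if len(points) < 2:
--         return False
--     middle = max(points)[0] + min(points)[0] # abscissa
--     set_of_points = set([(i, j) for i, j in points])
--     for i, j in points:
--         if (middle - i, j) not in set_of_points:
--             return False
--     return True
-- ===== SOURCE B (Python) =====
-- def LineReflection356(points):
--     if len(points) < 2:
--         return False
--     middle = max(points)[0] + min(points)[0]
--     s = set((i, j) for i, j in points)
--     orig = sorted(s)
--     mirrored = sorted((middle - x, y) for x, y in s)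
--     return orig == mirrored
-- ===== Notes on version B (the rewrite author's own statement) =====
-- stated objective: alternative
-- what changed: Instead of probing the point set once per input point with a membership test, B deduplicates the points and decides symmetry by comparing the sorted point set against the sorted list of its mirror images.
import Mathlib
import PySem

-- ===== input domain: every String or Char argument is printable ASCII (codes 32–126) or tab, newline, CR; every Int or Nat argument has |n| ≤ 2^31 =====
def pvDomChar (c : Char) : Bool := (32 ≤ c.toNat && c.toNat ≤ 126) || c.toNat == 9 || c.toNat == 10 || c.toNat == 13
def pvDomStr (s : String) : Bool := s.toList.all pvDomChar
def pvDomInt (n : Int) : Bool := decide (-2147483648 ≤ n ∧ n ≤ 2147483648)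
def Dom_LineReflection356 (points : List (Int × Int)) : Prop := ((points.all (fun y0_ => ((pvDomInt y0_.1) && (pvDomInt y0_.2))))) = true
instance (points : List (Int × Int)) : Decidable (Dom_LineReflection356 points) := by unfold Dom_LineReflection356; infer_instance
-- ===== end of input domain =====

-- B checks vertical symmetry by comparing the sorted deduplicated point set with its sorted mirror image,
-- instead of A's per-point membership probes into a hash set (objective: alternative, same return value).

-- ===== PORT A =====
-- the 'for i, j in points: if (middle - i, j) not in set_of_points: return False' loop, with its early return
def lineRefLoopA (middle : Int) (s : PySem.Set (Int × Int)) : List (Int × Int) → Bool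
  | [] => true
  | (i, j) :: rest =>
    if !(PySem.Set.contains s (middle - i, j)) then false
    else lineRefLoopA middle s rest

def LineReflection356 (points : List (Int × Int)) : Bool :=
  if points.length < 2 then false
  else
    -- max(points) / min(points): lexicographic extrema of tuples
    match PySem.List.max2? points (fun p => p.1) (fun p => p.2),
          PySem.List.min2? points (fun p => p.1) (fun p => p.2) with
    | some mx, some mn =>
      let middle := mx.1 + mn.1
      let setOfPoints := PySem.Set.ofList (points.map (fun p => (p.1, p.2)))
      lineRefLoopA middle setOfPoints points
    | _, _ => false   -- unreachable totality guard: points is nonempty past the length guard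

-- ===== PORT B =====
def LineReflection356_alt (points : List (Int × Int)) : Bool :=
  if points.length < 2 then false
  else
    match PySem.List.max2? points (fun p => p.1) (fun p => p.2) with
    | none => false   -- unreachable totality guard: points is nonempty past the length guard
    | some mx =>
      match PySem.List.min2? points (fun p => p.1) (fun p => p.2) with
      | none => false   -- unreachable totality guard
      | some mn =>
      let middle := mx.1 + mn.1
      let s := PySem.Set.ofList (points.map (fun p => (p.1, p.2)))
      let orig := PySem.List.sorted2 s (fun p => p.1) (fun p => p.2)
      let mirrored := PySem.List.sorted2 (s.map (fun p => (middle - p.1, p.2))) (fun p => p.1) (fun p => p.2)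
      decide (orig = mirrored)

-- ===== PRECONDITION & SPEC =====
def Spec_LineReflection356 (points : List (Int × Int)) (out : Bool) : Prop := out = LineReflection356_alt points
instance (points : List (Int × Int)) (out : Bool) : Decidable (Spec_LineReflection356 points out) := by unfold Spec_LineReflection356; infer_instance

-- ===== CLAIM (what is proved, stated in full; the proofs are below) =====
def Claim_equal_LineReflection356 : Prop := ∀ (points : List (Int × Int)), Dom_LineReflection356 points → Spec_LineReflection356 points (LineReflection356 points)

-- ===== LEMMAS AND PROOFS =====

-- A's loop is the 'all points mirror into the set' check
theorem lineRefLoopA_eq_all (middle : Int) (s : PySem.Set (Int × Int)) (l : List (Int × Int)) :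
    lineRefLoopA middle s l = l.all (fun p => PySem.Set.contains s (middle - p.1, p.2)) := by
  induction l with
  | nil => rfl
  | cons p rest ih =>
    obtain ⟨i, j⟩ := p
    simp only [lineRefLoopA, List.all_cons, ih]
    cases h : PySem.Set.contains s (middle - i, j) <;> simp


-- a max2?/min2? result is an element of the list
theorem foldl_max2_mem {α : Type} (step : Option α → α → Option α)
    (hstep : ∀ acc x, step acc x = some x ∨ step acc x = acc) :
    ∀ (xs : List α) (acc : Option α) (m : α), xs.foldl step acc = some m → acc = some m ∨ m ∈ xs := by
  intro xs
  induction xs with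
  | nil => intro acc m h; exact Or.inl h
  | cons x rest ih =>
    intro acc m h
    rcases ih (step acc x) m h with h' | h'
    · rcases hstep acc x with e | e
      · rw [e] at h'; exact Or.inr (by simp [Option.some_inj.mp h'])
      · rw [e] at h'; exact Or.inl h'
    · exact Or.inr (List.mem_cons_of_mem _ h')

theorem max2?_mem' (xs : List (Int × Int)) (m : Int × Int)
    (h : PySem.List.max2? xs (fun p => p.1) (fun p => p.2) = some m) : m ∈ xs := by
  unfold PySem.List.max2? at h
  rcases foldl_max2_mem _ (by
      intro acc x
      cases acc with
      | none => exact Or.inl rfl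
      | some a => dsimp only; split
                  · exact Or.inl rfl
                  · exact Or.inr rfl) xs none m h with h' | h'
  · exact absurd h' (by simp)
  · exact h'

theorem min2?_mem' (xs : List (Int × Int)) (m : Int × Int)
    (h : PySem.List.min2? xs (fun p => p.1) (fun p => p.2) = some m) : m ∈ xs := by
  unfold PySem.List.min2? at h
  rcases foldl_max2_mem _ (by
      intro acc x
      cases acc with
      | none => exact Or.inl rfl
      | some a => dsimp only; split
                  · exact Or.inl rfl
                  · exact Or.inr rfl) xs none m h with h' | h'
  · exact absurd h' (by simp)
  · exact h'

-- congruence for insertBy and for the insertion-sort fold, when the comparators agree on the elements involved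
theorem insertBy_congr {α : Type} (f g : α → α → Bool) (x : α) (ys : List α)
    (h : ∀ y ∈ ys, f x y = g x y) :
    PySem.List.insertBy f x ys = PySem.List.insertBy g x ys := by
  induction ys with
  | nil => rfl
  | cons y ys ih =>
    simp only [PySem.List.insertBy]
    rw [h y (List.mem_cons_self), ih (fun z hz => h z (List.mem_cons_of_mem _ hz))]

theorem foldl_insertBy_congr {α : Type} (f g : α → α → Bool) (s : List α)
    (h : ∀ a ∈ s, ∀ b ∈ s, f a b = g a b) :
    ∀ (xs acc : List α), (∀ a ∈ xs, a ∈ s) → (∀ a ∈ acc, a ∈ s) →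
      xs.foldl (fun acc x => PySem.List.insertBy f x acc) acc
        = xs.foldl (fun acc x => PySem.List.insertBy g x acc) acc := by
  intro xs
  induction xs with
  | nil => intro acc _ _; rfl
  | cons x rest ih =>
    intro acc hxs hacc
    have hx : x ∈ s := hxs x (List.mem_cons_self)
    simp only [List.foldl_cons]
    rw [insertBy_congr f g x acc (fun y hy => h x hx y (hacc y hy))]
    exact ih _ (fun a ha => hxs a (List.mem_cons_of_mem _ ha))
      (fun a ha => by
        rcases (PySem.List.mem_insertBy g x a acc).mp ha with rfl | ha'
        · exact hx
        · exact hacc a ha')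

-- the lexicographic Int × Int key, encoded into a single Int (faithful on coordinates |·| < 2^33)
def pvEnc (p : Int × Int) : Int := p.1 * 17179869184 + p.2

def pvBnd (p : Int × Int) : Prop := p.1 < 8589934592 ∧ -8589934592 < p.1 ∧ p.2 < 8589934592 ∧ -8589934592 < p.2

theorem enc_lt_iff (a b : Int × Int) (ha : pvBnd a) (hb : pvBnd b) :
    (pvEnc a < pvEnc b) ↔ (a.1 < b.1 ∨ (¬ b.1 < a.1 ∧ a.2 < b.2)) := by
  obtain ⟨_, _, _, _⟩ := ha; obtain ⟨_, _, _, _⟩ := hb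
  unfold pvEnc
  omega

theorem enc_inj (a b : Int × Int) (ha : pvBnd a) (hb : pvBnd b) (h : pvEnc a = pvEnc b) : a = b := by
  obtain ⟨_, _, _, _⟩ := ha; obtain ⟨_, _, _, _⟩ := hb
  obtain ⟨a1, a2⟩ := a; obtain ⟨b1, b2⟩ := b
  unfold pvEnc at h
  simp only [Prod.mk.injEq]
  omega

-- on a list of bounded pairs, sorted2 by (fst, snd) is sorting by the encoded key
theorem sorted2_eq_sorted_enc (xs : List (Int × Int)) (hb : ∀ p ∈ xs, pvBnd p) :
    PySem.List.sorted2 xs (fun p => p.1) (fun p => p.2)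
      = PySem.List.sorted xs pvEnc := by
  rw [PySem.List.sorted_eq_foldl_insertBy]
  unfold PySem.List.sorted2
  exact foldl_insertBy_congr _ _ xs
    (by
      intro a ha b hbm
      have h := enc_lt_iff a b (hb a ha) (hb b hbm)
      rcases Decidable.em (a.1 < b.1) with h1 | h1 <;>
        rcases Decidable.em (b.1 < a.1) with h2 | h2 <;>
          rcases Decidable.em (a.2 < b.2) with h3 | h3 <;>
            simp [h1, h2, h3, h])
    xs [] (fun a ha => ha) (by simp)

-- sorting by the (injective-on-bounded) key is invariant under permutation
theorem sorted_enc_eq_of_perm (xs ys : List (Int × Int)) (hnd : ys.Nodup)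
    (hb : ∀ p ∈ ys, pvBnd p) (hperm : xs.Perm ys) :
    PySem.List.sorted xs pvEnc = PySem.List.sorted ys pvEnc := by
  apply PySem.List.sorted_eq_of_perm_of_pairwise_lt
  · exact (PySem.List.sorted_perm ys pvEnc false).trans hperm.symm
  · have hle := PySem.List.sorted_pairwise ys pvEnc
    have hnd' : (PySem.List.sorted ys pvEnc).Nodup :=
      (PySem.List.sorted_perm ys pvEnc false).nodup_iff.mpr hnd
    have hmem : ∀ p ∈ PySem.List.sorted ys pvEnc, pvBnd p :=
      fun p hp => hb p ((PySem.List.sorted_perm ys pvEnc false).mem_iff.mp hp)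
    have := List.Pairwise.and hle (List.nodup_iff_pairwise_ne.mp hnd')
    exact this.imp_of_mem (by
      intro a b hma hmb hab
      rcases lt_or_eq_of_le hab.1 with h | h
      · exact h
      · exact absurd (enc_inj a b (hmem a hma) (hmem b hmb) h) hab.2)

-- ===== VERDICT (by name: the statement is the Claim_ definition above) =====
theorem LineReflection356_spec : Claim_equal_LineReflection356 := by
  intro points hdom
  unfold Spec_LineReflection356 LineReflection356 LineReflection356_alt
  by_cases hlen : points.length < 2
  · simp [hlen]
  · simp only [if_neg hlen]
    cases hmx : PySem.List.max2? points (fun p => p.1) (fun p => p.2) with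
    | none => cases hmn : PySem.List.min2? points (fun p => p.1) (fun p => p.2) <;> rfl
    | some mx =>
      cases hmn : PySem.List.min2? points (fun p => p.1) (fun p => p.2) with
      | none => rfl
      | some mn =>
        simp only []
        set middle := mx.1 + mn.1 with hmid
        have hmap : points.map (fun p => (p.1, p.2)) = points := by
          simp
        rw [hmap]
        set S : PySem.Set (Int × Int) := PySem.Set.ofList points with hS
        set m : (Int × Int) → (Int × Int) := fun p => (middle - p.1, p.2) with hm
        -- bounds
        have hdompt : ∀ p ∈ points, -2147483648 ≤ p.1 ∧ p.1 ≤ 2147483648 ∧ -2147483648 ≤ p.2 ∧ p.2 ≤ 2147483648 := by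
          intro p hp
          have := (List.all_eq_true.mp hdom) p hp
          simp only [pvDomInt, Bool.and_eq_true, decide_eq_true_eq] at this
          exact ⟨this.1.1, this.1.2, this.2.1, this.2.2⟩
        have hmxb := hdompt mx (max2?_mem' points mx hmx)
        have hmnb := hdompt mn (min2?_mem' points mn hmn)
        have hSmem : ∀ p, p ∈ S ↔ p ∈ points := fun p => PySem.Set.mem_ofList points p
        have hbS : ∀ p ∈ S, pvBnd p := by
          intro p hp
          have := hdompt p ((hSmem p).mp hp)
          exact ⟨by omega, by omega, by omega, by omega⟩
        have hbT : ∀ p ∈ S.map m, pvBnd p := by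
          intro p hp
          obtain ⟨q, hq, rfl⟩ := List.mem_map.mp hp
          have := hdompt q ((hSmem q).mp hq)
          refine ⟨?_, ?_, ?_, ?_⟩ <;> simp only [hm, hmid] <;> omega
        have hmm : ∀ p : Int × Int, m (m p) = p := by
          intro p; simp [hm]
        have hminj : Function.Injective m := fun a b h => by
          have := congrArg m h; rwa [hmm, hmm] at this
        have hndS : S.Nodup := PySem.Set.nodup_ofList points
        have hndT : (S.map m).Nodup := hndS.map hminj
        -- the two sides as propositions
        rw [lineRefLoopA_eq_all, Bool.eq_iff_iff]
        simp only [List.all_eq_true, PySem.Set.contains_iff, decide_eq_true_eq]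
        constructor
        · -- A's check ⇒ sorted lists equal
          intro hA
          have hAll : ∀ p ∈ S, m p ∈ S := fun p hp => hA p ((hSmem p).mp hp)
          have hperm : S.Perm (S.map m) := by
            rw [List.perm_ext_iff_of_nodup hndS hndT]
            intro a
            constructor
            · intro ha
              exact List.mem_map.mpr ⟨m a, hAll a ha, hmm a⟩
            · intro ha
              obtain ⟨b, hb, rfl⟩ := List.mem_map.mp ha
              exact hAll b hb
          rw [sorted2_eq_sorted_enc S hbS, sorted2_eq_sorted_enc (S.map m) hbT]
          exact sorted_enc_eq_of_perm S (S.map m) hndT hbT hperm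
        · -- sorted lists equal ⇒ A's check
          intro heq p hp
          have hperm : S.Perm (S.map m) :=
            ((PySem.List.sorted2_perm S (fun p => p.1) (fun p => p.2) false).symm.trans
              (heq ▸ PySem.List.sorted2_perm (S.map m) (fun p => p.1) (fun p => p.2) false))
          have hpS : p ∈ S := (hSmem p).mpr hp
          have : m p ∈ S.map m := List.mem_map.mpr ⟨p, hpS, rfl⟩
          exact hperm.mem_iff.mpr this
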